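-- pv_equiv track=rewrite | github.com/ULinuxdays/javelin_tracker | javelin_tracker/metrics.py | _aggregate_weekly_risk
-- ===== SOURCE A (Python) =====
-- def _aggregate_weekly_risk(flags: list[str]) -> str:
--     flags = [flag for flag in flags if flag]
--     if not flags:
--         return ""
--     if "HIGH" in flags:
--         return "HIGH"
--     if "MODERATE" in flags:
--         return "MODERATE"
--     return "LOW"
-- ===== SOURCE B (Python) =====
-- _SEVERITY = {"HIGH": 3, "MODERATE": 2}
-- _LABELS = ("", "LOW", "MODERATE", "HIGH")
--
--
-- def _aggregate_weekly_risk(flags: list[str]) -> str: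
--     # Map each non-empty flag to a numeric severity (unknown flags rank 1 = LOW),
--     # reduce with max over the severity lattice, then decode via a lookup table.
--     level = max((_SEVERITY.get(flag, 1) for flag in flags if flag), default=0)
--     return _LABELS[level]
-- ===== Notes on version B (the rewrite author's own statement) =====
-- stated objective: alternative
-- what changed: Replaces the filter-comprehension plus ordered membership scans with a numeric severity lattice: each non-empty flag is mapped through a severity dict (HIGH=3, MODERATE=2, other=1), a single max-reduce picks the top severity, and a label table decodes it back to a string.
import Mathlib
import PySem

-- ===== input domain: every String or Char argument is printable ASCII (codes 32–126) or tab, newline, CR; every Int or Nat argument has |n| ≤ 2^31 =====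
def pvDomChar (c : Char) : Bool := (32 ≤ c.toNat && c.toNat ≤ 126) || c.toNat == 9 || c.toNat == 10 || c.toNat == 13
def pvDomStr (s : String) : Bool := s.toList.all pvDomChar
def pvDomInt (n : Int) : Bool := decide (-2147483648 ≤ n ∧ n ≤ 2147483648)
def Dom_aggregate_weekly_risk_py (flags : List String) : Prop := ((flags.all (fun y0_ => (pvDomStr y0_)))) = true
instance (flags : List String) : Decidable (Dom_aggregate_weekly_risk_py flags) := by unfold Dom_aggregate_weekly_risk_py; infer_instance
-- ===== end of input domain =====

-- B replaces A's filter-then-membership-scans with a numeric severity lattice: each flag maps to a rank, a max-reduce picks the top rank, a table decodes it (alternative decomposition, same cost).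


-- ===== PORT A =====
def aggregate_weekly_risk_py (flags : List String) : String :=
  let flags := flags.filter (fun flag => !(flag == ""))
  if flags = [] then ""
  else if flags.contains "HIGH" then "HIGH"
  else if flags.contains "MODERATE" then "MODERATE"
  else "LOW"

-- ===== PORT B =====
-- the module-level _SEVERITY dict literal and _LABELS tuple of Source B (distinct keys, insertion order)
def pvSEVERITY : PySem.Dict String Nat := PySem.Dict.mk [("HIGH", 3), ("MODERATE", 2)]
def pvLABELS : List String := ["", "LOW", "MODERATE", "HIGH"]

-- max((_SEVERITY.get(flag, 1) for flag in flags if flag), default=0) ported as a foldl of max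
-- starting at 0 (exact: every generated severity is ≥ 1, and 0 arises exactly in the empty case,
-- matching default=0); _LABELS[level] ported with getD (level ≤ 3 always, so the default "" is never hit).
def aggregate_weekly_risk_py_alt (flags : List String) : String :=
  let level := flags.foldl (fun lv flag => if flag == "" then lv else max lv (PySem.Dict.getD pvSEVERITY flag 1)) 0
  pvLABELS.getD level ""

-- ===== PRECONDITION & SPEC =====
def Spec_aggregate_weekly_risk_py (flags : List String) (out : String) : Prop := out = aggregate_weekly_risk_py_alt flags
instance (flags : List String) (out : String) : Decidable (Spec_aggregate_weekly_risk_py flags out) := by unfold Spec_aggregate_weekly_risk_py; infer_instance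

-- ===== CLAIM (what is proved, stated in full; the proofs are below) =====
def Claim_equal_aggregate_weekly_risk_py : Prop := ∀ (flags : List String), Dom_aggregate_weekly_risk_py flags → Spec_aggregate_weekly_risk_py flags (aggregate_weekly_risk_py flags)

-- ===== LEMMAS AND PROOFS =====
theorem pvSev_high : pvSEVERITY.getD "HIGH" 1 = 3 := by rfl

theorem pvSev_mod : pvSEVERITY.getD "MODERATE" 1 = 2 := by rfl

theorem pvSev_other (x : String) (h1 : x ≠ "HIGH") (h2 : x ≠ "MODERATE") :
    pvSEVERITY.getD x 1 = 1 := by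
  rw [PySem.Dict.getD_eq_get?_getD, pvSEVERITY, PySem.Dict.get?_mk_cons, PySem.Dict.get?_mk_cons]
  simp [Ne.symm h1, Ne.symm h2, PySem.Dict.get?]

-- the max-fold computes max lv (top severity among the non-empty flags, 0 if there is none)
theorem pvFold_max_char (l : List String) (lv : Nat) :
    l.foldl (fun lv flag => if flag == "" then lv else max lv (PySem.Dict.getD pvSEVERITY flag 1)) lv =
      max lv
        (if (l.filter (fun f => !(f == ""))).contains "HIGH" then 3
         else if (l.filter (fun f => !(f == ""))).contains "MODERATE" then 2
         else if l.filter (fun f => !(f == "")) = [] then 0 else 1) := by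
  induction l generalizing lv with
  | nil => simp
  | cons x xs ih =>
    simp only [List.foldl_cons]
    by_cases hx : x = ""
    · subst hx; simpa using ih lv
    · by_cases hH : x = "HIGH"
      · subst hH
        rw [ih]
        simp only [List.filter_cons]
        simp [pvSev_high]
        split_ifs <;> omega
      · by_cases hM : x = "MODERATE"
        · subst hM
          rw [ih]
          simp only [List.filter_cons]
          simp [pvSev_mod]
          split_ifs <;> omega
        · rw [ih]
          simp only [List.filter_cons]
          simp [pvSev_other x hH hM, hx, Ne.symm hH, Ne.symm hM]
          split_ifs <;> omega

-- ===== VERDICT (by name: the statement is the Claim_ definition above) =====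
theorem aggregate_weekly_risk_py_spec : Claim_equal_aggregate_weekly_risk_py := by
  intro flags _
  show aggregate_weekly_risk_py flags = aggregate_weekly_risk_py_alt flags
  unfold aggregate_weekly_risk_py aggregate_weekly_risk_py_alt
  rw [pvFold_max_char]
  generalize flags.filter (fun flag => !(flag == "")) = fl
  by_cases hH : "HIGH" ∈ fl
  · have hne : fl ≠ [] := by rintro rfl; simp at hH
    simp [hH, hne, pvLABELS]
  · by_cases hM : "MODERATE" ∈ fl
    · have hne : fl ≠ [] := by rintro rfl; simp at hM
      simp [hH, hM, hne, pvLABELS]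
    · by_cases he : fl = []
      · simp [he, pvLABELS]
      · simp [hH, hM, he, pvLABELS]
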